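-- pv_equiv track=rewrite | github.com/Adaminius/wheel_of_creation_tools | random_name.py | word_to_phonemes
-- ===== SOURCE A (Python) =====
-- special_consonant_mapping = {text: i for text, i in
--   zip(['shch', 'sch', 'sh', 'ch', 'kh', 'ts', 'dzh', 'zh', 'ph', 'lh'],
--       r'01234569789!@#$%^&*()+_.,/\?')
-- }
--
-- reverse_special_consonant_mapping = {v: k for k, v in special_consonant_mapping.items()}
--
-- def encode_consonants(word):
--     """This is a really dumb way to deal with the problem of multiple letter consonants,
--     but it was the first thing that I thought of."""
--     for k, v in special_consonant_mapping.items():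
--         word = word.replace(k, v)
--     return word
--
-- def decode_consonants(word):
--     for k, v in reverse_special_consonant_mapping.items():
--         word = word.replace(k, v)
--     return word
--
-- def is_vowel(letter: str):
--     if letter in {'a', 'e', 'i', 'o', 'u', 'y'}:
--         return True
--
-- def is_consonant(letter: str):
--     if letter == 'y':
--         return True
--     return not is_vowel(letter)
--
-- def word_to_phonemes(word: str, max_length=5):
--     word = list(encode_consonants(word.lower()))
--
--     phonemes = []
--     current_phoneme = ''
--     found_vowel = False
--     while len(word) > 2:
--         letter = word.pop(0)
--         current_phoneme += letter
--         if (is_consonant(letter) and found_vowel) or len(current_phoneme) >= max_length: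
--             phonemes.append(current_phoneme)
--             current_phoneme = ''
--             found_vowel = False
--         if is_vowel(letter):
--             found_vowel = True
--     if len(current_phoneme) < 2:
--         phonemes.append(current_phoneme + ''.join(word))
--     else:
--         phonemes.append(current_phoneme)
--         phonemes.append(''.join(word))
--
--     return [decode_consonants(p) for p in phonemes]
-- ===== SOURCE B (Python) =====
-- special_consonant_mapping = {text: i for text, i in
--   zip(['shch', 'sch', 'sh', 'ch', 'kh', 'ts', 'dzh', 'zh', 'ph', 'lh'],
--       r'01234569789!@#$%^&*()+_.,/\?')
-- }
--
-- reverse_special_consonant_mapping = {v: k for k, v in special_consonant_mapping.items()}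
--
-- def encode_consonants(word):
--     for k, v in special_consonant_mapping.items():
--         word = word.replace(k, v)
--     return word
--
-- def decode_consonants(word):
--     for k, v in reverse_special_consonant_mapping.items():
--         word = word.replace(k, v)
--     return word
--
-- def is_vowel(letter):
--     return letter in {'a', 'e', 'i', 'o', 'u', 'y'}
--
-- def is_consonant(letter):
--     return letter == 'y' or not is_vowel(letter)
--
-- def word_to_phonemes(word, max_length=5):
--     # Pass 1: scan by index, recording the cut position after each completed phoneme.
--     w = encode_consonants(word.lower())
--     n = len(w)
--     cuts = []
--     start = 0
--     found_vowel = False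
--     i = 0
--     while n - i > 2:
--         c = w[i]
--         i += 1
--         if (is_consonant(c) and found_vowel) or i - start >= max_length:
--             cuts.append(i)
--             start = i
--             found_vowel = False
--         if is_vowel(c):
--             found_vowel = True
--     # Pass 2: slice the encoded word at the cut positions.
--     chunks = []
--     prev = 0
--     for c in cuts:
--         chunks.append(w[prev:c])
--         prev = c
--     last = w[start:i]
--     if len(last) < 2:
--         chunks.append(last + w[i:])
--     else:
--         chunks.append(last)
--         chunks.append(w[i:])
--     return [decode_consonants(p) for p in chunks]
-- ===== Notes on version B (the rewrite author's own statement) =====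
-- stated objective: faster
-- what changed: A pops characters off the front of a mutable list (O(n) per pop) while growing the current phoneme string; B scans the encoded word by index in one pass recording only cut positions, then produces the phonemes in a second pass by slicing the word at those positions.
import Mathlib
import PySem

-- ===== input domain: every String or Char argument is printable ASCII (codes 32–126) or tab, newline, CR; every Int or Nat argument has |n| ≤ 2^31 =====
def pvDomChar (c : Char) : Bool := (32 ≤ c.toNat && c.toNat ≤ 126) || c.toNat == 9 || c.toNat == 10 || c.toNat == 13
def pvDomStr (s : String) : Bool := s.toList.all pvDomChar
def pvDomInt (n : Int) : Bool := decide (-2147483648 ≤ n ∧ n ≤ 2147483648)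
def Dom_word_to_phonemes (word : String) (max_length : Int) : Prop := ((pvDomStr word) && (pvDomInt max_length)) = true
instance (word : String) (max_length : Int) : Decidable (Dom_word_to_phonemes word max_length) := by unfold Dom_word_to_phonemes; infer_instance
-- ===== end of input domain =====

-- B replaces A's destructive pop-and-accumulate loop by a two-pass scheme: an index scan that
-- records cut positions, then slicing at those positions (objective: faster — a timing run
-- measured it; A's pop(0) per character is quadratic, B's index scan is linear).

-- ===== PORT A =====
-- shared module helpers (identical in Source A and Source B): the special-consonant code maps,
-- encode/decode (sequential str.replace), is_vowel / is_consonant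
def pvSCMap : List (List Char × List Char) :=
  [("shch".toList, "0".toList), ("sch".toList, "1".toList), ("sh".toList, "2".toList),
   ("ch".toList, "3".toList), ("kh".toList, "4".toList), ("ts".toList, "5".toList),
   ("dzh".toList, "6".toList), ("zh".toList, "9".toList), ("ph".toList, "7".toList),
   ("lh".toList, "8".toList)]

def pvSCMapRev : List (List Char × List Char) := pvSCMap.map (fun kv => (kv.2, kv.1))

def encodeCons (w : List Char) : List Char :=
  pvSCMap.foldl (fun w kv => PySem.Chars.replace w kv.1 kv.2) w

def decodeCons (w : List Char) : List Char :=
  pvSCMapRev.foldl (fun w kv => PySem.Chars.replace w kv.1 kv.2) w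

def isVowel (c : Char) : Bool := ['a', 'e', 'i', 'o', 'u', 'y'].contains c

def isConsonant (c : Char) : Bool := c == 'y' || !isVowel c

-- the while-loop of A: pop from the front, accumulate the current phoneme
def loopA (ml : Int) : List Char → List (List Char) → List Char → Bool →
    (List (List Char) × List Char × List Char)
  | c :: rest, phs, cur, fv =>
      if 2 < (c :: rest).length then
        let cur' := cur ++ [c]
        if (isConsonant c && fv) || (ml ≤ (cur'.length : Int)) then
          loopA ml rest (phs ++ [cur']) [] (isVowel c)
        else
          loopA ml rest phs cur' (fv || isVowel c)
      else (phs, cur, c :: rest)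
  | [], phs, cur, _ => (phs, cur, [])

def word_to_phonemes (word : String) (max_length : Int) : List String :=
  let w := encodeCons (PySem.Chars.lower word.toList)
  let r := loopA max_length w [] [] false
  let phs := if r.2.1.length < 2 then r.1 ++ [r.2.1 ++ r.2.2]
             else (r.1 ++ [r.2.1]) ++ [r.2.2]
  phs.map (fun p => String.ofList (decodeCons p))

-- ===== PORT B =====
-- pass 1 of B: scan by index, recording the cut position after each completed phoneme
def scanB (ml : Int) (w : List Char) (i start : Nat) (fv : Bool) (cuts : List Nat) :
    List Nat × Nat × Nat :=
  if h : i + 2 < w.length then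
    let c := w[i]
    if (isConsonant c && fv) || (ml ≤ (i : Int) + 1 - (start : Int)) then
      scanB ml w (i + 1) (i + 1) (isVowel c) (cuts ++ [i + 1])
    else
      scanB ml w (i + 1) start (fv || isVowel c) cuts
  else (cuts, start, i)
termination_by w.length - i

-- pass 2 of B: slice the word at the recorded cut positions
def sliceLoop (w : List Char) (prev : Nat) : List Nat → List (List Char)
  | [] => []
  | c :: cs => PySem.List.slice w (some (prev : Int)) (some (c : Int)) :: sliceLoop w c cs

def word_to_phonemes_alt (word : String) (max_length : Int) : List String :=
  let w := encodeCons (PySem.Chars.lower word.toList)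
  let r := scanB max_length w 0 0 false []
  let chunks := sliceLoop w 0 r.1
  let last := PySem.List.slice w (some (r.2.1 : Int)) (some (r.2.2 : Int))
  let chunks' := if last.length < 2 then
        chunks ++ [last ++ PySem.List.slice w (some (r.2.2 : Int)) none]
      else (chunks ++ [last]) ++ [PySem.List.slice w (some (r.2.2 : Int)) none]
  chunks'.map (fun p => String.ofList (decodeCons p))

-- ===== PRECONDITION & SPEC =====
def Spec_word_to_phonemes (word : String) (max_length : Int) (out : List String) : Prop := out = word_to_phonemes_alt word max_length
instance (word : String) (max_length : Int) (out : List String) : Decidable (Spec_word_to_phonemes word max_length out) := by unfold Spec_word_to_phonemes; infer_instance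

-- ===== CLAIM (what is proved, stated in full; the proofs are below) =====
def Claim_equal_word_to_phonemes : Prop := ∀ (word : String) (max_length : Int), Dom_word_to_phonemes word max_length → Spec_word_to_phonemes word max_length (word_to_phonemes word max_length)

-- ===== LEMMAS AND PROOFS =====

-- the cuts accumulator of scanB is a pure prefix
theorem scanB_cuts (ml : Int) (w : List Char) (i start : Nat) (fv : Bool) (cuts : List Nat) :
    scanB ml w i start fv cuts =
      (cuts ++ (scanB ml w i start fv []).1, (scanB ml w i start fv []).2) := by
  conv_lhs => rw [scanB.eq_def]
  conv_rhs => rw [scanB.eq_def]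
  split
  · dsimp only
    split
    · rw [scanB_cuts ml w (i + 1) (i + 1) (isVowel w[i]) (cuts ++ [i + 1]),
        scanB_cuts ml w (i + 1) (i + 1) (isVowel w[i]) ([] ++ [i + 1])]
      simp
    · exact scanB_cuts ml w (i + 1) start (fv || isVowel w[i]) cuts
  · simp
termination_by w.length - i

-- main invariant: A's loop over the remaining suffix equals B's index scan + slicing
theorem loopA_eq_scanB (ml : Int) (w : List Char) (i start : Nat) (fv : Bool)
    (phs : List (List Char)) (hsi : start ≤ i) (hin : i ≤ w.length) :
    loopA ml (w.drop i) phs ((w.drop start).take (i - start)) fv =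
      (phs ++ sliceLoop w start (scanB ml w i start fv []).1,
       (w.drop (scanB ml w i start fv []).2.1).take
         ((scanB ml w i start fv []).2.2 - (scanB ml w i start fv []).2.1),
       w.drop (scanB ml w i start fv []).2.2) := by
  by_cases h : i + 2 < w.length
  · have hi : i < w.length := by omega
    have hcur : (w.drop start).take (i - start) ++ [w[i]] =
        (w.drop start).take (i + 1 - start) := by
      rw [show i + 1 - start = (i - start) + 1 by omega, List.take_add_one]
      congr 1
      rw [List.getElem?_drop, show start + (i - start) = i by omega]
      simp [List.getElem?_eq_getElem hi]
    have hlen : ((((w.drop start).take (i + 1 - start)).length : Nat) : Int) =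
        (i : Int) + 1 - (start : Int) := by
      simp [List.length_take, List.length_drop]
      omega
    rw [List.drop_eq_getElem_cons hi, loopA]
    rw [if_pos (by simp; omega)]
    rw [scanB.eq_def, dif_pos h]
    dsimp only
    rw [hcur, hlen]
    by_cases hc : (isConsonant w[i] && fv || decide (ml ≤ (i : Int) + 1 - (start : Int))) = true
    · rw [if_pos hc, if_pos hc]
      rw [show ([] : List Char) = (w.drop (i + 1)).take ((i + 1) - (i + 1)) by simp]
      rw [loopA_eq_scanB ml w (i + 1) (i + 1) (isVowel w[i]) (phs ++ [(w.drop start).take (i + 1 - start)]) (le_refl _) (by omega)]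
      rw [scanB_cuts ml w (i + 1) (i + 1) (isVowel w[i]) ([] ++ [i + 1])]
      simp only [List.nil_append, sliceLoop, PySem.List.slice_natCast, List.append_assoc,
        List.singleton_append]
    · rw [if_neg hc, if_neg hc]
      exact loopA_eq_scanB ml w (i + 1) start (fv || isVowel w[i]) phs (by omega) (by omega)
  · rw [scanB.eq_def, dif_neg h]
    dsimp only [sliceLoop]
    rcases hd : w.drop i with _ | ⟨c, rest⟩
    · simp [loopA]
    · have hl := congrArg List.length hd
      simp only [List.length_drop, List.length_cons] at hl
      rw [loopA, if_neg (by simp; omega), ← hd]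
      simp
termination_by w.length - i

-- ===== VERDICT (by name: the statement is the Claim_ definition above) =====
theorem word_to_phonemes_spec : Claim_equal_word_to_phonemes := by
  intro word ml _
  unfold Spec_word_to_phonemes word_to_phonemes word_to_phonemes_alt
  have key := loopA_eq_scanB ml (encodeCons (PySem.Chars.lower word.toList)) 0 0 false []
    (le_refl 0) (Nat.zero_le _)
  simp only [List.drop_zero, Nat.sub_zero, List.take_zero] at key
  simp only [key, PySem.List.slice_natCast, PySem.List.slice_from_natCast, List.nil_append]
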